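-- pv_equiv track=rewrite | github.com/subashksf/expense_tracker | backend/app/queue.py | _summarize_exception
-- ===== SOURCE A (Python) =====
-- def _summarize_exception(exc_info: str) -> str:
--     lines = [line.strip() for line in exc_info.splitlines() if line.strip()]
--     if not lines:
--         return "Queue job failed."
--
--     error_lines = [
--         line
--         for line in lines
--         if (
--             "sqlalchemy.exc." in line
--             or "psycopg.errors." in line
--             or line.startswith("IntegrityError")
--             or line.startswith("OperationalError")
--             or line.startswith("ProgrammingError")
--             or line.startswith("ValueError")
--             or line.startswith("KeyError")
--         )
--     ]
--     if error_lines: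
--         return " | ".join(error_lines[:2])[:1000]
--
--     # Fallback to last non-background line.
--     for line in reversed(lines):
--         if "Background on this error" not in line:
--             return line[:1000]
--     return lines[-1][:1000]
-- ===== SOURCE B (Python) =====
-- def _summarize_exception(exc_info: str) -> str:
--     def is_error(line):
--         return ("sqlalchemy.exc." in line
--                 or "psycopg.errors." in line
--                 or line.startswith(("IntegrityError", "OperationalError",
--                                     "ProgrammingError", "ValueError", "KeyError")))
--
--     errors = []            # at most the first two matching lines
--     last_non_bg = None     # last stripped non-empty line without the background marker
--     last = None            # last stripped non-empty line
--     for raw in exc_info.splitlines():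
--         line = raw.strip()
--         if not line:
--             continue
--         last = line
--         if len(errors) < 2 and is_error(line):
--             errors.append(line)
--         if "Background on this error" not in line:
--             last_non_bg = line
--     if last is None:
--         return "Queue job failed."
--     if errors:
--         return " | ".join(errors)[:1000]
--     if last_non_bg is not None:
--         return last_non_bg[:1000]
--     return last[:1000]
-- ===== Notes on version B (the rewrite author's own statement) =====
-- stated objective: alternative
-- what changed: Replaces A's three separate scans (build full error-line list, then reverse scan for the last non-background line, then lines[-1]) by one forward pass that keeps at most the first two error lines, the last non-background line and the last line as running state.
import Mathlib
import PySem

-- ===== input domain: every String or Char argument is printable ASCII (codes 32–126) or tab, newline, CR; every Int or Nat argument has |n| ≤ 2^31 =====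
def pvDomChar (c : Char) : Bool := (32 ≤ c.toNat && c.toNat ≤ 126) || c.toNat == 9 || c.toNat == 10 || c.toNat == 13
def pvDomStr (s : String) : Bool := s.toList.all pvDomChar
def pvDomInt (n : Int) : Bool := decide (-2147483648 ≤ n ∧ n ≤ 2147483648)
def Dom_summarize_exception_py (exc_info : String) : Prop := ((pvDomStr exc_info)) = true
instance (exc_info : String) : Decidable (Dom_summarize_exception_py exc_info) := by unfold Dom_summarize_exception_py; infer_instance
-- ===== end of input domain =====

-- B replaces A's three scans over the lines by a single forward pass carrying
-- (first two error lines, last non-background line, last line) as state; same result, same cost.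

-- ===== PORT A =====
def pvIsErr (line : String) : Bool :=
  PySem.Str.isIn "sqlalchemy.exc." line || PySem.Str.isIn "psycopg.errors." line ||
  PySem.Str.startswith line "IntegrityError" || PySem.Str.startswith line "OperationalError" ||
  PySem.Str.startswith line "ProgrammingError" || PySem.Str.startswith line "ValueError" ||
  PySem.Str.startswith line "KeyError"

def summarize_exception_py (exc_info : String) : String :=
  let lines := (PySem.Str.splitlines exc_info).filterMap (fun line =>
    let s := PySem.Str.strip line
    if s.toList = [] then none else some s)
  if lines = [] then "Queue job failed."
  else
    let error_lines := lines.filter pvIsErr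
    if error_lines ≠ [] then
      PySem.Str.slice (PySem.Str.join " | " (PySem.List.slice error_lines none (some 2))) none (some 1000)
    else
      match lines.reverse.find? (fun line => !(PySem.Str.isIn "Background on this error" line)) with
      | some line => PySem.Str.slice line none (some 1000)
      -- lines[-1]: lines ≠ [] here, so pyGet? is some and the default is never used
      | none => PySem.Str.slice ((PySem.List.pyGet? lines (-1)).getD "") none (some 1000)

-- ===== PORT B =====
def pvInnerB (st : List String × Option String × Option String) (line : String) :
    List String × Option String × Option String :=
  let errs := if st.1.length < 2 && pvIsErr line then st.1 ++ [line] else st.1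
  let lastNB := if PySem.Str.isIn "Background on this error" line then st.2.1 else some line
  (errs, lastNB, some line)

def pvStepB (st : List String × Option String × Option String) (raw : String) :
    List String × Option String × Option String :=
  let line := PySem.Str.strip raw
  if line.toList = [] then st else pvInnerB st line

def summarize_exception_py_alt (exc_info : String) : String :=
  match (PySem.Str.splitlines exc_info).foldl pvStepB ([], none, none) with
  | (errs, lastNB, last) =>
    match last with
    | none => "Queue job failed."
    | some l =>
      if errs ≠ [] then PySem.Str.slice (PySem.Str.join " | " errs) none (some 1000)
      else
        match lastNB with
        | some nb => PySem.Str.slice nb none (some 1000)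
        | none => PySem.Str.slice l none (some 1000)

-- ===== PRECONDITION & SPEC =====
def Spec_summarize_exception_py (exc_info : String) (out : String) : Prop := out = summarize_exception_py_alt exc_info
instance (exc_info : String) (out : String) : Decidable (Spec_summarize_exception_py exc_info out) := by unfold Spec_summarize_exception_py; infer_instance

-- ===== CLAIM (what is proved, stated in full; the proofs are below) =====
def Claim_equal_summarize_exception_py : Prop := ∀ (exc_info : String), Dom_summarize_exception_py exc_info → Spec_summarize_exception_py exc_info (summarize_exception_py exc_info)

-- ===== LEMMAS AND PROOFS =====
theorem pvFold_filterMap (xs : List String) (st : List String × Option String × Option String) :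
    xs.foldl pvStepB st =
      (xs.filterMap (fun raw =>
        let s := PySem.Str.strip raw
        if s.toList = [] then none else some s)).foldl pvInnerB st := by
  induction xs generalizing st with
  | nil => rfl
  | cons a xs ih =>
      simp only [List.foldl_cons, List.filterMap_cons, pvStepB]
      by_cases h : PySem.Chars.strip a.toList = [] <;> simp [h, ih]

theorem pvFold_spec (ls : List String) (errs : List String) (lastNB last : Option String) :
    ls.foldl pvInnerB (errs, lastNB, last) =
      (errs ++ (ls.filter pvIsErr).take (2 - errs.length),
       (ls.reverse.find? (fun l => !(PySem.Str.isIn "Background on this error" l))).or lastNB,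
       (ls.reverse.head?).or last) := by
  induction ls generalizing errs lastNB last with
  | nil => simp
  | cons a ls ih =>
      rw [List.foldl_cons]
      show List.foldl pvInnerB
        (if errs.length < 2 && pvIsErr a then errs ++ [a] else errs,
         if PySem.Str.isIn "Background on this error" a then lastNB else some a,
         some a) ls = _
      rw [ih]
      simp only [List.reverse_cons, List.find?_append, List.filter_cons]
      refine Prod.ext ?_ (Prod.ext ?_ ?_)
      · by_cases he : pvIsErr a = true
        · by_cases hl : errs.length < 2
          · have hl' : errs.length ≤ 1 := by omega
            have h2 : 2 - errs.length = (1 - errs.length) + 1 := by omega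
            have h3 : 2 - (errs.length + 1) = 1 - errs.length := by omega
            simp [he, hl', h2, h3, List.take_succ_cons]
          · have hl' : ¬ errs.length ≤ 1 := by omega
            have h0 : 2 - errs.length = 0 := by omega
            simp [he, hl', h0]
        · simp [he]
      · show (ls.reverse.find? (fun l => !(PySem.Str.isIn "Background on this error" l))).or
            (if PySem.Str.isIn "Background on this error" a = true then lastNB else some a) = _
        rw [Option.or_assoc]
        congr 1
        rw [List.find?_cons]
        cases hc : PySem.Str.isIn "Background on this error" a with
        | true => simp
        | false => simp
      · show (ls.reverse.head?).or (some a) = ((ls.reverse ++ [a]).head?).or last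
        cases h : ls.reverse with
        | nil => simp
        | cons b bs => simp

theorem pvTake_ne_nil {α : Type} (xs : List α) (h : xs ≠ []) : xs.take 2 ≠ [] := by
  cases xs <;> simp_all

-- ===== VERDICT (by name: the statement is the Claim_ definition above) =====
theorem summarize_exception_py_spec : Claim_equal_summarize_exception_py := by
  intro exc_info _
  show _ = _
  unfold summarize_exception_py summarize_exception_py_alt
  rw [pvFold_filterMap, pvFold_spec]
  set lines := (PySem.Str.splitlines exc_info).filterMap (fun raw =>
    let s := PySem.Str.strip raw
    if s.toList = [] then none else some s) with hlines
  simp only [List.nil_append, Option.or_none]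
  by_cases hnil : lines = []
  · simp [hnil]
  · have hh : lines.reverse.head? = some (lines.getLast hnil) := by
      rw [List.head?_reverse, List.getLast?_eq_some_getLast]
    simp only [hnil, if_false, hh]
    by_cases herr : lines.filter pvIsErr = []
    · simp only [herr, List.take_nil, ne_eq, not_true_eq_false, if_false]
      cases hf : lines.reverse.find? (fun l => !(PySem.Str.isIn "Background on this error" l)) with
      | some l => simp
      | none =>
          simp only
          rw [PySem.List.pyGet?_neg_one, List.getLast?_eq_some_getLast hnil]
          rfl
    · have h2 : (lines.filter pvIsErr).take 2 ≠ [] := pvTake_ne_nil _ herr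
      have hslice : PySem.List.slice (lines.filter pvIsErr) none (some 2) =
          (lines.filter pvIsErr).take 2 := by
        rw [PySem.List.slice_to _ (by norm_num)]; rfl
      simp [herr, h2, hslice]
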